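-- pv_equiv track=rewrite | github.com/bgeun31/IS_ERP | backend/routers/devices_router.py | _extract_log_sections
-- ===== SOURCE A (Python) =====
-- def _extract_log_sections(content: str, commands: list[str]) -> str:
--     lines = content.splitlines()
--     result: list[str] = []
--     capturing = False
--
--     for line in lines:
--         if "# " in line:
--             cmd_part = line.split("#", 1)[1].strip().lower()
--             is_target = any(command in cmd_part for command in commands)
--             if is_target:
--                 capturing = True
--                 result.append(line)
--                 continue
--             if capturing and cmd_part:
--                 capturing = False
--         if capturing:
--             result.append(line)
--
--     return "\n".join(result).strip()
-- ===== SOURCE B (Python) =====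
-- def _extract_log_sections(content: str, commands: list[str]) -> str:
--     # Two-phase: split the log into sections at every real command header,
--     # tag each section as target/non-target, then join the target sections.
--     sections = [[False, []]]
--     for line in content.splitlines():
--         if "# " in line:
--             cmd_part = line.split("#", 1)[1].strip().lower()
--             is_target = any(command in cmd_part for command in commands)
--             if is_target or cmd_part:
--                 sections.append([is_target, [line]])
--                 continue
--         sections[-1][1].append(line)
--     picked = [ln for is_target, lines in sections if is_target for ln in lines]
--     return "\n".join(picked).strip()
-- ===== Notes on version B (the rewrite author's own statement) =====
-- stated objective: alternative
-- what changed: Replaces A's toggle-flag single pass (capturing boolean mutated while appending lines) with a two-phase decomposition: first split the log into sections at each real command header, tagging each section target/non-target, then join the lines of the target sections.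
import Mathlib
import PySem

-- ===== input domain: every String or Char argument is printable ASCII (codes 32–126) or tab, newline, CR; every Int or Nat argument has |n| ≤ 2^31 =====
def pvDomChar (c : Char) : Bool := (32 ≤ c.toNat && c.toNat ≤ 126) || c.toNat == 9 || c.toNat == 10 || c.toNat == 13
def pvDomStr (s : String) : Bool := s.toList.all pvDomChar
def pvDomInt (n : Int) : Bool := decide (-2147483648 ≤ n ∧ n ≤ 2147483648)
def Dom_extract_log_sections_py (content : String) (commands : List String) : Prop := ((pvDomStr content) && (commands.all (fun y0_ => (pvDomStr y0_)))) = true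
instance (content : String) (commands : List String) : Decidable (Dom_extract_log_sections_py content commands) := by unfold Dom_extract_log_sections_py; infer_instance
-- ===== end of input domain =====

-- B replaces A's toggle-flag single pass by a build-sections-then-filter two-phase
-- decomposition (objective: alternative decomposition; same cost).

-- ===== PORT A =====
-- line.split("#", 1)[1].strip().lower(); the [1] index exists whenever "# " is in
-- line (both programs only call this under that guard), so the list getD default is never used there.
def pvCmdPart (line : String) : String :=
  PySem.Str.lower (PySem.Str.strip (((PySem.Str.splitMax? line "#" 1).getD []).getD 1 ""))

def pvStepA (commands : List String) (acc : List String × Bool) (line : String) :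
    List String × Bool :=
  if PySem.Str.isIn "# " line then
    let cmd_part := pvCmdPart line
    let is_target := commands.any (fun command => PySem.Str.isIn command cmd_part)
    if is_target then (acc.1 ++ [line], true)
    else
      let capturing := if acc.2 = true ∧ cmd_part ≠ "" then false else acc.2
      if capturing then (acc.1 ++ [line], capturing) else (acc.1, capturing)
  else
    if acc.2 then (acc.1 ++ [line], acc.2) else (acc.1, acc.2)

def extract_log_sections_py (content : String) (commands : List String) : String :=
  let lines := PySem.Str.splitlines content
  let st := lines.foldl (pvStepA commands) ([], false)
  PySem.Str.strip (PySem.Str.join "\n" st.1)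

-- ===== PORT B =====
-- sections[-1][1].append(line)
def pvAppendLast (secs : List (Bool × List String)) (line : String) :
    List (Bool × List String) :=
  match secs with
  | [] => []
  | [(t, ls)] => [(t, ls ++ [line])]
  | s :: rest => s :: pvAppendLast rest line

def pvStepB (commands : List String) (secs : List (Bool × List String)) (line : String) :
    List (Bool × List String) :=
  if PySem.Str.isIn "# " line then
    let cmd_part := pvCmdPart line
    let is_target := commands.any (fun command => PySem.Str.isIn command cmd_part)
    if is_target = true ∨ cmd_part ≠ "" then secs ++ [(is_target, [line])]
    else pvAppendLast secs line
  else pvAppendLast secs line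

-- [ln for is_target, lines in sections if is_target for ln in lines]
def pvPicked (secs : List (Bool × List String)) : List String :=
  (secs.filter (·.1)).flatMap (·.2)

def extract_log_sections_py_alt (content : String) (commands : List String) : String :=
  let sections := (PySem.Str.splitlines content).foldl (pvStepB commands) [(false, [])]
  PySem.Str.strip (PySem.Str.join "\n" (pvPicked sections))

-- ===== PRECONDITION & SPEC =====
def Spec_extract_log_sections_py (content : String) (commands : List String) (out : String) : Prop := out = extract_log_sections_py_alt content commands
instance (content : String) (commands : List String) (out : String) : Decidable (Spec_extract_log_sections_py content commands out) := by unfold Spec_extract_log_sections_py; infer_instance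

-- ===== CLAIM (what is proved, stated in full; the proofs are below) =====
def Claim_equal_extract_log_sections_py : Prop := ∀ (content : String) (commands : List String), Dom_extract_log_sections_py content commands → Spec_extract_log_sections_py content commands (extract_log_sections_py content commands)

-- ===== LEMMAS AND PROOFS =====
def pvLastFlag (secs : List (Bool × List String)) : Bool :=
  (secs.getLast?.map (·.1)).getD false

lemma pvAppendLast_ne_nil (secs : List (Bool × List String)) (line : String)
    (h : secs ≠ []) : pvAppendLast secs line ≠ [] := by
  cases secs with
  | nil => exact absurd rfl h
  | cons s rest => cases rest <;> simp [pvAppendLast]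

lemma pvLastFlag_cons_of_ne_nil (s : Bool × List String) (l : List (Bool × List String))
    (h : l ≠ []) : pvLastFlag (s :: l) = pvLastFlag l := by
  cases l with
  | nil => exact absurd rfl h
  | cons s2 r2 => simp [pvLastFlag, List.getLast?_cons_cons]

lemma pvPicked_cons (s : Bool × List String) (l : List (Bool × List String)) :
    pvPicked (s :: l) = (if s.1 then s.2 else []) ++ pvPicked l := by
  cases s with
  | mk t ls => cases t <;> simp [pvPicked, List.filter_cons]

lemma pvLastFlag_appendLast (secs : List (Bool × List String)) (line : String) :
    pvLastFlag (pvAppendLast secs line) = pvLastFlag secs := by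
  induction secs with
  | nil => rfl
  | cons s rest ih =>
    cases rest with
    | nil => cases s; simp [pvAppendLast, pvLastFlag]
    | cons s2 r2 =>
      have h2 : (s2 :: r2 : List (Bool × List String)) ≠ [] := by simp
      rw [show pvAppendLast (s :: s2 :: r2) line = s :: pvAppendLast (s2 :: r2) line from rfl,
        pvLastFlag_cons_of_ne_nil s _ (pvAppendLast_ne_nil _ line h2), ih,
        pvLastFlag_cons_of_ne_nil s _ h2]

lemma pvPicked_appendLast (secs : List (Bool × List String)) (line : String)
    (h : secs ≠ []) :
    pvPicked (pvAppendLast secs line) =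
      pvPicked secs ++ (if pvLastFlag secs then [line] else []) := by
  induction secs with
  | nil => exact absurd rfl h
  | cons s rest ih =>
    cases rest with
    | nil =>
      cases s with
      | mk t ls => cases t <;> simp [pvAppendLast, pvPicked, pvLastFlag, List.filter]
    | cons s2 r2 =>
      have h2 : (s2 :: r2 : List (Bool × List String)) ≠ [] := by simp
      rw [show pvAppendLast (s :: s2 :: r2) line = s :: pvAppendLast (s2 :: r2) line from rfl,
        pvPicked_cons, ih h2, pvLastFlag_cons_of_ne_nil s _ h2]
      simp [pvPicked_cons, List.append_assoc]

lemma pvPicked_append_section (secs : List (Bool × List String)) (t : Bool) (ls : List String) :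
    pvPicked (secs ++ [(t, ls)]) = pvPicked secs ++ (if t then ls else []) := by
  cases t <;> simp [pvPicked, List.filter_append]

lemma pvLastFlag_append_section (secs : List (Bool × List String)) (t : Bool) (ls : List String) :
    pvLastFlag (secs ++ [(t, ls)]) = t := by
  simp [pvLastFlag]

lemma pv_loop_inv (commands : List String) (lines : List String) :
    ∀ (secs : List (Bool × List String)) (res : List String) (cap : Bool),
      secs ≠ [] → cap = pvLastFlag secs → res = pvPicked secs →
      (lines.foldl (pvStepA commands) (res, cap)).1 =
        pvPicked (lines.foldl (pvStepB commands) secs) := by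
  induction lines with
  | nil => intro secs res cap _ _ hres; simpa using hres
  | cons line rest ih =>
    intro secs res cap hne hcap hres
    simp only [List.foldl_cons]
    by_cases hin : PySem.Str.isIn "# " line = true
    · by_cases htar : commands.any (fun command => PySem.Str.isIn command (pvCmdPart line)) = true
      · -- target header: new target section
        have hA : pvStepA commands (res, cap) line = (res ++ [line], true) := by
          simp only [pvStepA, hin, htar, if_true, eq_self_iff_true, ite_true]
        have hB : pvStepB commands secs line = secs ++ [(true, [line])] := by
          simp only [pvStepB, hin, htar, if_true, eq_self_iff_true, true_or, ite_true]
        rw [hA, hB]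
        exact ih _ _ _ (by simp) (by simp [pvLastFlag_append_section])
          (by simp [hres, pvPicked_append_section])
      · by_cases hempty : pvCmdPart line = ""
        · -- empty-command header: behaves like an ordinary line
          have htar' : (commands.any fun command => PySem.Str.isIn command (pvCmdPart line)) = false := by
            simpa using htar
          have hA : pvStepA commands (res, cap) line =
              (if cap then (res ++ [line], cap) else (res, cap)) := by
            rw [hempty] at htar'
            simp only [pvStepA, hin, if_true, hempty, htar', Bool.false_eq_true, ite_false, ne_eq,
              not_true_eq_false, and_false, ite_self]
          have hB : pvStepB commands secs line = pvAppendLast secs line := by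
            rw [hempty] at htar'
            simp only [pvStepB, hin, if_true, hempty, htar', Bool.false_eq_true, false_or, ne_eq,
              not_true_eq_false, or_false, ite_false]
          rw [hA, hB]
          cases hc : cap <;>
            refine ih _ _ _ (pvAppendLast_ne_nil _ _ hne) (by rw [pvLastFlag_appendLast, ← hcap, hc])
              (by rw [pvPicked_appendLast _ _ hne, ← hcap, hc, hres] ; simp)
        · -- real non-target header: new non-target section, capture stops
          have htar' : (commands.any fun command => PySem.Str.isIn command (pvCmdPart line)) = false := by
            simpa using htar
          have hA : pvStepA commands (res, cap) line = (res, false) := by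
            cases hc : cap <;>
              simp only [pvStepA, hin, if_true, htar', Bool.false_eq_true, ite_false, ne_eq,
                hempty, not_false_eq_true, and_true]
          have hB : pvStepB commands secs line = secs ++ [(false, [line])] := by
            simp only [pvStepB, htar', hin, if_true, ne_eq, hempty, not_false_eq_true,
              Bool.false_eq_true, false_or, or_true, ite_true, if_pos]
          rw [hA, hB]
          exact ih _ _ _ (by simp) (by simp [pvLastFlag_append_section])
            (by simp [hres, pvPicked_append_section])
    · -- ordinary line
      have hA : pvStepA commands (res, cap) line =
          (if cap then (res ++ [line], cap) else (res, cap)) := by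
        unfold pvStepA; rw [if_neg hin]
      have hB : pvStepB commands secs line = pvAppendLast secs line := by
        unfold pvStepB; rw [if_neg hin]
      rw [hA, hB]
      cases hc : cap <;>
        refine ih _ _ _ (pvAppendLast_ne_nil _ _ hne) (by rw [pvLastFlag_appendLast, ← hcap, hc])
          (by rw [pvPicked_appendLast _ _ hne, ← hcap, hc, hres] ; simp)

-- ===== VERDICT (by name: the statement is the Claim_ definition above) =====
theorem extract_log_sections_py_spec : Claim_equal_extract_log_sections_py := by
  intro content commands _
  unfold Spec_extract_log_sections_py extract_log_sections_py extract_log_sections_py_alt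
  have h := pv_loop_inv commands (PySem.Str.splitlines content) [(false, [])] [] false
    (by simp) (by simp [pvLastFlag]) (by simp [pvPicked])
  simp only [h]
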